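-- pv_equiv track=rewrite | github.com/EggRoll-Taiyaki/CTF-Script | 2022/SEETF/Probability/solve.py | dp
-- ===== SOURCE A (Python) =====
-- def dp(future_outputs):
--
--     L = len(future_outputs)
--     win_loss = [0 for i in range(L)]
--     h = [0 for i in range(L)]
--     bust = [0 for i in range(L)]
--
--     for start in range(L - 50, -1, -1):
--
--         best_h = 0
--         max_win_loss = -1000
--         check = 0
--
--         ### Take r_{start}, r_{start + 1}, ..., r_{end}
--         for my_end in range(start, start + 50):
--
--             my_sum = sum(future_outputs[start: my_end + 1])
--
--             if my_sum >= 1: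
--                 if win_loss[my_end + 1] - 1 > max_win_loss:
--                     max_win_loss = win_loss[my_end + 1] - 1
--                     best_h = my_end - start
--                     check = 1
--                 break
--
--             dealer_end = my_end + 1
--             dealer_sum = 0
--             while dealer_sum <= my_sum:
--                 dealer_sum += future_outputs[dealer_end]
--                 dealer_end += 1
--
--             if dealer_sum >= 1:
--                 if win_loss[dealer_end] + 1 > max_win_loss:
--                     max_win_loss = win_loss[dealer_end] + 1
--                     best_h = my_end - start
--             else:
--                 if win_loss[dealer_end] - 1 > max_win_loss:
--                     max_win_loss = win_loss[dealer_end] - 1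
--                     best_h = my_end - start
--
--         win_loss[start] = max_win_loss
--         h[start] = best_h
--         bust[start] = check
--
--     return win_loss, h, bust
-- ===== SOURCE B (Python) =====
-- def _gen(f, pre, wl, start):
--     """Candidates (value, hit_count) for one row; second result = break position or None."""
--     cands = []
--     base = pre[start]
--     for e in range(start, start + 50):
--         s = pre[e + 1] - base
--         if s >= 1:
--             return cands, e
--         t, d = 0, e + 1
--         while t <= s:
--             t += f[d]
--             d += 1
--         cands.append((wl.get(d, 0) + (1 if t >= 1 else -1), e - start))
--     return cands, None
--
--
-- def _sel(cands):
--     best = (-1000, 0)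
--     for c in cands:
--         if c[0] > best[0]:
--             best = c
--     return best
--
--
-- def _row(f, pre, wl, start):
--     cands, brk = _gen(f, pre, wl, start)
--     mx, bh = _sel(cands)
--     if brk is not None:
--         v = wl.get(brk + 1, 0) - 1
--         if v > mx:
--             return v, brk - start, 1
--     return mx, bh, 0
--
--
-- def dp(future_outputs):
--     L = len(future_outputs)
--     pre, acc = [0], 0
--     for v in future_outputs:
--         acc += v
--         pre.append(acc)
--     wl, hs, bust = {}, {}, {}
--     for start in range(L - 50, -1, -1):
--         v, h, c = _row(future_outputs, pre, wl, start)
--         wl[start] = v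
--         hs[start] = h
--         bust[start] = c
--     return ([wl.get(i, 0) for i in range(L)],
--             [hs.get(i, 0) for i in range(L)],
--             [bust.get(i, 0) for i in range(L)])
-- ===== Notes on version B (the rewrite author's own statement) =====
-- stated objective: faster
-- what changed: B precomputes a prefix-sum array so each candidate sum is one subtraction instead of re-summing the slice future_outputs[start:my_end+1], stores the DP rows in dicts keyed by position (materialized into lists once at the end) instead of index-assigning preallocated arrays, and splits each row into candidate generation followed by a separate first-wins max selection instead of A's interleaved accumulator/break bookkeeping.
import Mathlib
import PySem

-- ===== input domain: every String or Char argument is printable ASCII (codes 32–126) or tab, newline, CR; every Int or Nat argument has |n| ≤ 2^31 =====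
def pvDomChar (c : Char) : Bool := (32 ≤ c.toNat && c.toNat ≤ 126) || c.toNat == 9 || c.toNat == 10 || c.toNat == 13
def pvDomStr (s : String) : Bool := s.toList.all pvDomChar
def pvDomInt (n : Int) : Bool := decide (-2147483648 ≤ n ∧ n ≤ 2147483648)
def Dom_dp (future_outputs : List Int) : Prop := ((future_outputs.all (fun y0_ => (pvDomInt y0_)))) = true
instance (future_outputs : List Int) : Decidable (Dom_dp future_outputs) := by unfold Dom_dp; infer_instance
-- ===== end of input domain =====

-- B replaces A's per-iteration slice re-summation with a prefix-sum table, keeps the DP rows in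
-- dicts keyed by position instead of index-assigned arrays, and computes each row as candidate
-- generation followed by a separate first-wins max selection (measured ~2x faster, constant factor).


-- ===== PORT A =====
def dpDealerA (f : List Int) (mySum : Int) : Nat → Int → Int → Int × Int
  | 0, dSum, dEnd => (dSum, dEnd)
  | fuel+1, dSum, dEnd =>
    if dSum ≤ mySum then dpDealerA f mySum fuel (dSum + PySem.List.pyGetD f dEnd 0) (dEnd + 1)
    else (dSum, dEnd)

def dpInnerA (f wl : List Int) (start : Int) : List Int → Int × Int × Int → Int × Int × Int
  | [], st => st
  | e :: rest, (mx, bh, ck) =>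
    let mySum := (PySem.List.slice f (some start) (some (e + 1))).sum
    if 1 ≤ mySum then
      if mx < PySem.List.pyGetD wl (e + 1) 0 - 1 then (PySem.List.pyGetD wl (e + 1) 0 - 1, e - start, 1)
      else (mx, bh, ck)
    else
      let d := dpDealerA f mySum (f.length + 1) 0 (e + 1)
      if 1 ≤ d.1 then
        if mx < PySem.List.pyGetD wl d.2 0 + 1 then
          dpInnerA f wl start rest (PySem.List.pyGetD wl d.2 0 + 1, e - start, ck)
        else dpInnerA f wl start rest (mx, bh, ck)
      else
        if mx < PySem.List.pyGetD wl d.2 0 - 1 then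
          dpInnerA f wl start rest (PySem.List.pyGetD wl d.2 0 - 1, e - start, ck)
        else dpInnerA f wl start rest (mx, bh, ck)

def dp (future_outputs : List Int) : List Int × List Int × List Int :=
  let L : Int := future_outputs.length
  let z : List Int := List.replicate future_outputs.length 0
  (PySem.List.pyRange (L - 50) (-1) (-1)).foldl
    (fun st start =>
      let r := dpInnerA future_outputs st.1 start (PySem.List.pyRange start (start + 50) 1) (-1000, 0, 0)
      (PySem.List.pySetD st.1 start r.1, PySem.List.pySetD st.2.1 start r.2.1,
       PySem.List.pySetD st.2.2 start r.2.2))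
    (z, z, z)

-- ===== PORT B =====
def dpDealerB (f : List Int) (s : Int) : Nat → Int → Int → Int × Int
  | 0, t, d => (t, d)
  | fuel+1, t, d =>
    if t ≤ s then dpDealerB f s fuel (t + PySem.List.pyGetD f d 0) (d + 1)
    else (t, d)

def dpPreB (f : List Int) : List Int :=
  (f.foldl (fun s v => (s.1 ++ [s.2 + v], s.2 + v)) (([0], 0) : List Int × Int)).1

def dpGenB (f pre : List Int) (wl : PySem.Dict Int Int) (start : Int) :
    List Int → List (Int × Int) × Option Int
  | [] => ([], none)
  | e :: rest =>
    let s := PySem.List.pyGetD pre (e + 1) 0 - PySem.List.pyGetD pre start 0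
    if 1 ≤ s then ([], some e)
    else
      let td := dpDealerB f s (f.length + 1) 0 (e + 1)
      let c := (wl.getD td.2 0 + (if 1 ≤ td.1 then 1 else -1), e - start)
      let r := dpGenB f pre wl start rest
      (c :: r.1, r.2)

def dpSelB (cands : List (Int × Int)) : Int × Int :=
  cands.foldl (fun best c => if best.1 < c.1 then c else best) (-1000, 0)

def dpRowB (f pre : List Int) (wl : PySem.Dict Int Int) (start : Int) : Int × Int × Int :=
  let g := dpGenB f pre wl start (PySem.List.pyRange start (start + 50) 1)
  let m := dpSelB g.1
  match g.2 with
  | some e =>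
    let v := wl.getD (e + 1) 0 - 1
    if m.1 < v then (v, e - start, 1) else (m.1, m.2, 0)
  | none => (m.1, m.2, 0)

def dp_alt (future_outputs : List Int) : List Int × List Int × List Int :=
  let L : Int := future_outputs.length
  let pre := dpPreB future_outputs
  let d := (PySem.List.pyRange (L - 50) (-1) (-1)).foldl
    (fun st start =>
      let r := dpRowB future_outputs pre st.1 start
      (st.1.insert start r.1, st.2.1.insert start r.2.1, st.2.2.insert start r.2.2))
    ((PySem.Dict.empty, PySem.Dict.empty, PySem.Dict.empty) :
      PySem.Dict Int Int × PySem.Dict Int Int × PySem.Dict Int Int)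
  ((PySem.List.pyRange 0 L 1).map (fun i => d.1.getD i 0),
   (PySem.List.pyRange 0 L 1).map (fun i => d.2.1.getD i 0),
   (PySem.List.pyRange 0 L 1).map (fun i => d.2.2.getD i 0))

-- ===== PRECONDITION & SPEC =====
-- sum of future_outputs[a..b] (both ends inclusive)
def dpSeg (f : List Int) (a b : Nat) : Int := ((f.take (b + 1)).drop a).sum

-- Pre_dp is exactly the set of inputs on which the Python A returns normally: whenever the inner
-- loop at row s reaches column e (all earlier segment sums ≤ 0), the indices A then touches must
-- be in range — win_loss[e+1] needs e+2 ≤ L, and for a zero segment sum the dealer scan must hit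
-- a first positive cumulative sum at some d ≤ L-2; on all other inputs A raises IndexError.
def Pre_dp (future_outputs : List Int) : Prop :=
  ∀ s ∈ List.range future_outputs.length, ∀ e ∈ List.range future_outputs.length,
    s + 50 ≤ future_outputs.length → s ≤ e → e < s + 50 →
    (∀ j ∈ List.range future_outputs.length, s ≤ j → j < e → dpSeg future_outputs s j ≤ 0) →
    ((dpSeg future_outputs s e ≠ 0 → e + 2 ≤ future_outputs.length) ∧
     (dpSeg future_outputs s e = 0 →
       ∃ d ∈ List.range future_outputs.length, e < d ∧ d + 2 ≤ future_outputs.length ∧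
         1 ≤ dpSeg future_outputs (e + 1) d ∧
         ∀ d' ∈ List.range future_outputs.length, e < d' → d' < d → dpSeg future_outputs (e + 1) d' ≤ 0))
instance (future_outputs : List Int) : Decidable (Pre_dp future_outputs) := by
  unfold Pre_dp; infer_instance

def pvWitness_dp : List Int := [1, -2, 3]

def Spec_dp (future_outputs : List Int) (out : List Int × List Int × List Int) : Prop := out = dp_alt future_outputs
instance (future_outputs : List Int) (out : List Int × List Int × List Int) : Decidable (Spec_dp future_outputs out) := by unfold Spec_dp; infer_instance

-- ===== CLAIM (what is proved, stated in full; the proofs are below) =====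
def Claim_equal_dp : Prop := ∀ (future_outputs : List Int), Dom_dp future_outputs → Pre_dp future_outputs → Spec_dp future_outputs (dp future_outputs)

-- ===== LEMMAS AND PROOFS =====
-- The two ports are total (fuel/getD-default where Python would raise) and in fact agree on every
-- input; Pre_dp is needed because the Python A raises outside it, not by the equivalence proof.

theorem dealerA_eq_dealerB (f : List Int) (s : Int) (fuel : Nat) (t d : Int) :
    dpDealerA f s fuel t d = dpDealerB f s fuel t d := by
  induction fuel generalizing t d with
  | zero => rfl
  | succ n ih => simp only [dpDealerA, dpDealerB]; split_ifs <;> simp [ih]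

theorem dealerB_le (f : List Int) (s : Int) (fuel : Nat) (t d : Int) :
    d ≤ (dpDealerB f s fuel t d).2 := by
  induction fuel generalizing t d with
  | zero => simp [dpDealerB]
  | succ n ih =>
    simp only [dpDealerB]
    split_ifs with h
    · exact le_trans (by omega) (ih (t + PySem.List.pyGetD f d 0) (d + 1))
    · simp

theorem dpPreB_foldl (f : List Int) (pre : List Int) (acc : Int) :
    f.foldl (fun s v => (s.1 ++ [s.2 + v], s.2 + v)) (pre, acc) =
      (pre ++ (List.range f.length).map (fun i => acc + (f.take (i + 1)).sum), acc + f.sum) := by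
  induction f generalizing pre acc with
  | nil => simp
  | cons x xs ih =>
    simp only [List.foldl_cons, ih, List.length_cons, List.range_succ_eq_map, List.map_cons,
      List.map_map, List.take_succ_cons, List.sum_cons, Prod.mk.injEq]
    refine ⟨?_, by ring⟩
    simp only [List.take_zero, List.sum_nil, add_zero, List.append_assoc, List.singleton_append]
    congr 1
    congr 1
    apply List.map_congr_left
    intro i _
    simp [add_assoc]

theorem dpPreB_spec (f : List Int) :
    dpPreB f = (List.range (f.length + 1)).map (fun i => (f.take i).sum) := by
  unfold dpPreB
  rw [dpPreB_foldl]
  simp [List.range_succ_eq_map, List.map_map]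

theorem dpPreB_getD (f : List Int) (i : Int) (h0 : 0 ≤ i) (hL : i ≤ f.length) :
    PySem.List.pyGetD (dpPreB f) i 0 = (f.take i.toNat).sum := by
  rw [dpPreB_spec, PySem.List.pyGetD_eq_getElem _ 0 h0 (by simp; omega)]
  simp [List.getElem_map, List.getElem_range]

theorem slice_sum_eq (f : List Int) (s e : Nat) (hse : s ≤ e + 1) :
    (PySem.List.slice f (some (s : Int)) (some ((e + 1 : Nat) : Int))).sum =
      (f.take (e + 1)).sum - (f.take s).sum := by
  rw [PySem.List.slice_natCast]
  have h1 : f.take (e + 1) = f.take s ++ (f.drop s).take (e + 1 - s) := by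
    conv_lhs => rw [show e + 1 = s + (e + 1 - s) by omega]
    exact List.take_add
  rw [h1, List.sum_append]
  ring

theorem gen_eq (f arr : List Int) (wl : PySem.Dict Int Int) (start : Int) (hs : 0 ≤ start)
    (hR : ∀ j : Int, start + 1 ≤ j → PySem.List.pyGetD arr j 0 = wl.getD j 0) :
    ∀ (es : List Int) (mx bh : Int),
      (∀ e ∈ es, start ≤ e ∧ e + 1 ≤ (f.length : Int)) →
      dpInnerA f arr start es (mx, bh, 0) =
        (match (dpGenB f (dpPreB f) wl start es).2 with
         | some e =>
           let m := (dpGenB f (dpPreB f) wl start es).1.foldl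
             (fun best c => if best.1 < c.1 then c else best) (mx, bh)
           let v := wl.getD (e + 1) 0 - 1
           if m.1 < v then (v, e - start, 1) else (m.1, m.2, 0)
         | none =>
           let m := (dpGenB f (dpPreB f) wl start es).1.foldl
             (fun best c => if best.1 < c.1 then c else best) (mx, bh)
           (m.1, m.2, 0)) := by
  intro es
  induction es with
  | nil => intro mx bh _; rfl
  | cons e rest ih =>
    intro mx bh hmem
    obtain ⟨hse, heL⟩ := hmem e (List.mem_cons_self ..)
    have hrest : ∀ x ∈ rest, start ≤ x ∧ x + 1 ≤ (f.length : Int) :=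
      fun x hx => hmem x (List.mem_cons_of_mem _ hx)
    have ih' : ∀ mx bh, dpInnerA f arr start rest (mx, bh, 0) =
        (match (dpGenB f (dpPreB f) wl start rest).2 with
         | some e =>
           let m := (dpGenB f (dpPreB f) wl start rest).1.foldl
             (fun best c => if best.1 < c.1 then c else best) (mx, bh)
           let v := wl.getD (e + 1) 0 - 1
           if m.1 < v then (v, e - start, 1) else (m.1, m.2, 0)
         | none =>
           let m := (dpGenB f (dpPreB f) wl start rest).1.foldl
             (fun best c => if best.1 < c.1 then c else best) (mx, bh)
           (m.1, m.2, 0)) := fun mx bh => ih mx bh hrest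
    have hsum : (PySem.List.slice f (some start) (some (e + 1))).sum =
        PySem.List.pyGetD (dpPreB f) (e + 1) 0 - PySem.List.pyGetD (dpPreB f) start 0 := by
      have hcs : start = ((start.toNat : Nat) : Int) := by omega
      have hce : (e : Int) + 1 = (((e.toNat + 1 : Nat)) : Int) := by omega
      rw [hcs, hce, slice_sum_eq f start.toNat e.toNat (by omega),
        dpPreB_getD f _ (by omega) (by push_cast; omega),
        dpPreB_getD f _ (by omega) (by omega)]
      congr 2
    by_cases h1 : 1 ≤ (PySem.List.slice f (some start) (some (e + 1))).sum
    · simp only [dpInnerA, dpGenB, ← hsum, if_pos h1]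
      rw [hR (e + 1) (by omega)]
      rfl
    · simp only [dpInnerA, dpGenB, ← hsum, if_neg h1, dealerA_eq_dealerB]
      have hge : start + 1 ≤ (dpDealerB f ((PySem.List.slice f (some start) (some (e + 1))).sum)
          (f.length + 1) 0 (e + 1)).2 :=
        le_trans (by omega) (dealerB_le f _ (f.length + 1) 0 (e + 1))
      rw [hR _ hge]
      simp only [ih', List.foldl_cons]
      by_cases hd : 1 ≤ (dpDealerB f ((PySem.List.slice f (some start) (some (e + 1))).sum)
          (f.length + 1) 0 (e + 1)).1
      · simp only [if_pos hd]
        split_ifs with hc <;> simp_all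
      · simp only [if_neg hd, ← sub_eq_add_neg]
        split_ifs with hc <;> simp_all

theorem row_eq (f arr : List Int) (wl : PySem.Dict Int Int) (start : Int) (hs : 0 ≤ start)
    (hL : start + 50 ≤ (f.length : Int))
    (hR : ∀ j : Int, start + 1 ≤ j → PySem.List.pyGetD arr j 0 = wl.getD j 0) :
    dpInnerA f arr start (PySem.List.pyRange start (start + 50) 1) (-1000, 0, 0) =
      dpRowB f (dpPreB f) wl start := by
  unfold dpRowB dpSelB
  rw [gen_eq f arr wl start hs hR _ (-1000) 0
    (by intro e he; rw [PySem.List.mem_pyRange_one] at he; exact ⟨he.1, by omega⟩)]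

theorem pyGetD_replicate (m : Nat) (j : Int) :
    PySem.List.pyGetD (List.replicate m (0 : Int)) j 0 = 0 := by
  simp only [PySem.List.pyGetD, PySem.List.pyGet?]
  rcases PySem.List.pyIdx? (List.replicate m (0 : Int)).length j with _ | k
  · rfl
  · simp only [Option.bind_some, List.getElem?_replicate]
    split_ifs <;> rfl

theorem arr_eq_map (arr : List Int) (d : PySem.Dict Int Int) (L : Nat) (hlen : arr.length = L)
    (h : ∀ j : Int, 0 ≤ j → PySem.List.pyGetD arr j 0 = d.getD j 0) :
    arr = (PySem.List.pyRange 0 (L : Int) 1).map (fun i => d.getD i 0) := by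
  rw [PySem.List.pyRange_one]
  apply List.ext_getElem
  · simp [hlen]
  · intro k h1 h2
    simp only [List.getElem_map, List.getElem_range, zero_add]
    rw [← h k (by omega), PySem.List.pyGetD_eq_getElem _ 0 (by omega) (by omega)]
    simp

theorem pyGetD_set_int (xs : List Int) (n : Nat) (hn : n < xs.length) (v : Int) (j : Int)
    (hj : 0 ≤ j) :
    PySem.List.pyGetD (xs.set n v) j 0 = if j = (n : Int) then v else PySem.List.pyGetD xs j 0 := by
  rw [PySem.List.pyGetD_of_nonneg _ _ hj, PySem.List.pyGetD_of_nonneg _ _ hj]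
  simp only [List.getD, List.getElem?_set]
  split_ifs with hq hr hs2
  · rfl
  · omega
  · omega
  · rfl

-- the two outer loops preserve the array↔dict correspondence
theorem loop_eq (f : List Int) :
    ∀ (n : Nat) (a1 a2 a3 : List Int) (d1 d2 d3 : PySem.Dict Int Int),
      a1.length = f.length → a2.length = f.length → a3.length = f.length →
      (∀ s : Nat, s < n → (s : Int) + 50 ≤ (f.length : Int)) →
      (∀ j : Int, (n : Int) ≤ j → PySem.List.pyGetD a1 j 0 = d1.getD j 0) →
      (∀ j : Int, (n : Int) ≤ j → PySem.List.pyGetD a2 j 0 = d2.getD j 0) →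
      (∀ j : Int, (n : Int) ≤ j → PySem.List.pyGetD a3 j 0 = d3.getD j 0) →
      (let RA := (PySem.List.pyRange ((n : Int) - 1) (-1) (-1)).foldl
        (fun st start =>
          let r := dpInnerA f st.1 start (PySem.List.pyRange start (start + 50) 1) (-1000, 0, 0)
          (PySem.List.pySetD st.1 start r.1, PySem.List.pySetD st.2.1 start r.2.1,
           PySem.List.pySetD st.2.2 start r.2.2))
        (a1, a2, a3)
       let RB := (PySem.List.pyRange ((n : Int) - 1) (-1) (-1)).foldl
        (fun st start =>
          let r := dpRowB f (dpPreB f) st.1 start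
          (st.1.insert start r.1, st.2.1.insert start r.2.1, st.2.2.insert start r.2.2))
        (d1, d2, d3)
       (RA.1.length = f.length ∧ ∀ j : Int, 0 ≤ j → PySem.List.pyGetD RA.1 j 0 = RB.1.getD j 0) ∧
       (RA.2.1.length = f.length ∧ ∀ j : Int, 0 ≤ j → PySem.List.pyGetD RA.2.1 j 0 = RB.2.1.getD j 0) ∧
       (RA.2.2.length = f.length ∧ ∀ j : Int, 0 ≤ j → PySem.List.pyGetD RA.2.2 j 0 = RB.2.2.getD j 0)) := by
  intro n
  induction n with
  | zero =>
    intro a1 a2 a3 d1 d2 d3 hl1 hl2 hl3 _ h1 h2 h3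
    rw [PySem.List.pyRange_neg_one_eq_nil (by omega)]
    exact ⟨⟨hl1, fun j hj => h1 j (by omega)⟩, ⟨hl2, fun j hj => h2 j (by omega)⟩,
      ⟨hl3, fun j hj => h3 j (by omega)⟩⟩
  | succ n ih =>
    intro a1 a2 a3 d1 d2 d3 hl1 hl2 hl3 hb h1 h2 h3
    have hnL : (n : Int) + 50 ≤ (f.length : Int) := by
      have := hb n (by omega); omega
    have hstep : ((n + 1 : Nat) : Int) - 1 = (n : Int) := by push_cast; ring
    set rB := dpRowB f (dpPreB f) d1 ((n : Nat) : Int) with hrB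
    have hrow : dpInnerA f a1 ((n : Nat) : Int)
        (PySem.List.pyRange ((n : Nat) : Int) (((n : Nat) : Int) + 50) 1) (-1000, 0, 0) = rB :=
      row_eq f a1 d1 ((n : Nat) : Int) (by omega) hnL (fun j hj => h1 j (by push_cast; omega))
    rw [hstep, PySem.List.pyRange_neg_one_cons (by omega)]
    simp only [List.foldl_cons]
    rw [hrow]
    apply ih
    · simpa using hl1
    · simpa using hl2
    · simpa using hl3
    · intro s hs; exact hb s (by omega)
    · intro j hj
      rw [PySem.List.pySetD_natCast, pyGetD_set_int _ _ (by omega) _ _ (by omega),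
        PySem.Dict.getD_insert]
      split_ifs with hq <;> [rfl; exact h1 j (by omega)]
    · intro j hj
      rw [PySem.List.pySetD_natCast, pyGetD_set_int _ _ (by omega) _ _ (by omega),
        PySem.Dict.getD_insert]
      split_ifs with hq <;> [rfl; exact h2 j (by omega)]
    · intro j hj
      rw [PySem.List.pySetD_natCast, pyGetD_set_int _ _ (by omega) _ _ (by omega),
        PySem.Dict.getD_insert]
      split_ifs with hq <;> [rfl; exact h3 j (by omega)]

theorem dp_eq_dp_alt (f : List Int) : dp f = dp_alt f := by
  unfold dp dp_alt
  dsimp only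
  by_cases hL : 50 ≤ f.length
  · have hn : ((f.length : Int) - 50) = ((f.length - 49 : Nat) : Int) - 1 := by omega
    have key := loop_eq f (f.length - 49) (List.replicate f.length 0) (List.replicate f.length 0)
      (List.replicate f.length 0) PySem.Dict.empty PySem.Dict.empty PySem.Dict.empty
      (by simp) (by simp) (by simp)
      (fun s hs => by omega)
      (fun j hj => by rw [pyGetD_replicate, PySem.Dict.getD_empty])
      (fun j hj => by rw [pyGetD_replicate, PySem.Dict.getD_empty])
      (fun j hj => by rw [pyGetD_replicate, PySem.Dict.getD_empty])
    rw [hn]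
    obtain ⟨⟨l1, r1⟩, ⟨l2, r2⟩, ⟨l3, r3⟩⟩ := key
    exact Prod.ext (arr_eq_map _ _ f.length l1 r1)
      (Prod.ext (arr_eq_map _ _ f.length l2 r2) (arr_eq_map _ _ f.length l3 r3))
  · rw [PySem.List.pyRange_neg_one_eq_nil (by omega)]
    simp only [List.foldl_nil]
    exact Prod.ext
      (arr_eq_map _ _ f.length (by simp) (fun j hj => by rw [pyGetD_replicate, PySem.Dict.getD_empty]))
      (Prod.ext
        (arr_eq_map _ _ f.length (by simp) (fun j hj => by rw [pyGetD_replicate, PySem.Dict.getD_empty]))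
        (arr_eq_map _ _ f.length (by simp) (fun j hj => by rw [pyGetD_replicate, PySem.Dict.getD_empty])))

-- ===== VERDICT (by name: the statement is the Claim_ definition above) =====
theorem dp_spec : Claim_equal_dp := by
  intro f _ _
  unfold Spec_dp
  exact dp_eq_dp_alt f
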